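-- pv_equiv track=rewrite | github.com/Victoria011/Movie-Recommendation | tfidf.py | got_dataframe
-- ===== SOURCE A (Python) =====
-- def got_dataframe(upload_json):
-- 	result = []
-- 	for r in upload_json["info"]:
-- 		if "rating" in r.keys() and "title" in r.keys():
-- 			result.append((r['rating'], r['title']))
-- 		else:
-- 			return []
-- 	return result
-- ===== SOURCE B (Python) =====
-- def got_dataframe(upload_json):
--     info = upload_json["info"]
--     if all("rating" in r.keys() and "title" in r.keys() for r in info):
--         return [(r["rating"], r["title"]) for r in info]
--     return []
-- ===== Notes on version B (the rewrite author's own statement) =====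
-- stated objective: simpler
-- what changed: A's single fused loop with early return is split into a validation pass (all rows have both keys) followed by a list-comprehension build pass.
import Mathlib
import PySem

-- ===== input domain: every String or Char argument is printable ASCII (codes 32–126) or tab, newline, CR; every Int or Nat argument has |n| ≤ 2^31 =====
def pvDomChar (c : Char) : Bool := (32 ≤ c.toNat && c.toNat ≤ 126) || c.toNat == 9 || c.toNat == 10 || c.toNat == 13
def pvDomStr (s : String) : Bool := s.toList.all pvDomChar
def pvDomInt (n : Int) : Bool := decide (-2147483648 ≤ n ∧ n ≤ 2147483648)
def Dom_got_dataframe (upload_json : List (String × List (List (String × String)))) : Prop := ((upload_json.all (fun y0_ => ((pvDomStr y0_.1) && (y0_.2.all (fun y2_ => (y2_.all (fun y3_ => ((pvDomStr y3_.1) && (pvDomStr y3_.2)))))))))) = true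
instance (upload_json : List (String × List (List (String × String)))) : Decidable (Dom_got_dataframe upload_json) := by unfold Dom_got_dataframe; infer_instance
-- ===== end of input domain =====

-- B splits A's fused validate-and-accumulate loop (early return on a bad row) into a
-- validation pass followed by a build pass; same return value, no side effects.

-- ===== PORT A =====
-- A's for-loop: append (r['rating'], r['title']) while both keys present, early-return [] otherwise.
def gotLoopA : List (List (String × String)) → List (String × String) → List (String × String)
  | [], acc => acc
  | r :: rest, acc =>
    if (PySem.Dict.mk r).contains "rating" && (PySem.Dict.mk r).contains "title" then
      gotLoopA rest (acc ++ [((PySem.Dict.mk r).getD "rating" "", (PySem.Dict.mk r).getD "title" "")])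
    else []

def got_dataframe (upload_json : List (String × List (List (String × String)))) : List (String × String) :=
  match (PySem.Dict.mk upload_json).get? "info" with
  | none => []   -- KeyError in Python; excluded by Pre_got_dataframe
  | some info => gotLoopA info []

-- ===== PORT B =====
def rowOK (r : List (String × String)) : Bool :=
  (PySem.Dict.mk r).contains "rating" && (PySem.Dict.mk r).contains "title"

def got_dataframe_alt (upload_json : List (String × List (List (String × String)))) : List (String × String) :=
  match (PySem.Dict.mk upload_json).get? "info" with
  | none => []   -- KeyError in Python; excluded by Pre_got_dataframe
  | some info =>
    if info.all rowOK then
      info.map (fun r => ((PySem.Dict.mk r).getD "rating" "", (PySem.Dict.mk r).getD "title" ""))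
    else []

-- ===== PRECONDITION & SPEC =====
-- Pre_ excludes exactly the inputs where upload_json['info'] raises KeyError (no "info" key).
def Pre_got_dataframe (upload_json : List (String × List (List (String × String)))) : Prop :=
  (PySem.Dict.mk upload_json).contains "info" = true
instance (upload_json : List (String × List (List (String × String)))) : Decidable (Pre_got_dataframe upload_json) := by unfold Pre_got_dataframe; infer_instance

def pvWitness_got_dataframe : (List (String × List (List (String × String)))) :=
  [("info", [[("rating", "5"), ("title", "t")], [("title", "u"), ("rating", "3")]])]

def Spec_got_dataframe (upload_json : List (String × List (List (String × String)))) (out : List (String × String)) : Prop := out = got_dataframe_alt upload_json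
instance (upload_json : List (String × List (List (String × String)))) (out : List (String × String)) : Decidable (Spec_got_dataframe upload_json out) := by unfold Spec_got_dataframe; infer_instance

-- ===== CLAIM (what is proved, stated in full; the proofs are below) =====
def Claim_equal_got_dataframe : Prop := ∀ (upload_json : List (String × List (List (String × String)))), Dom_got_dataframe upload_json → Pre_got_dataframe upload_json → Spec_got_dataframe upload_json (got_dataframe upload_json)

-- ===== LEMMAS AND PROOFS =====
lemma gotLoopA_eq (info : List (List (String × String))) (acc : List (String × String)) :
    gotLoopA info acc =
      if info.all rowOK then
        acc ++ info.map (fun r => ((PySem.Dict.mk r).getD "rating" "", (PySem.Dict.mk r).getD "title" ""))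
      else [] := by
  induction info generalizing acc with
  | nil => simp [gotLoopA]
  | cons r rest ih =>
    simp only [gotLoopA]
    rw [show ((PySem.Dict.mk r).contains "rating" && (PySem.Dict.mk r).contains "title") = rowOK r from rfl]
    by_cases h : rowOK r = true
    · rw [if_pos h, ih]
      simp [List.all_cons, h]
    · rw [if_neg h]
      simp [List.all_cons, h]

-- ===== VERDICT (by name: the statement is the Claim_ definition above) =====
theorem got_dataframe_spec : Claim_equal_got_dataframe := by
  intro uj _ _
  unfold Spec_got_dataframe got_dataframe got_dataframe_alt
  cases (PySem.Dict.mk uj).get? "info" with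
  | none => rfl
  | some info => simp [gotLoopA_eq]
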